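-- pv_equiv track=rewrite | github.com/LiuJiamao521/translate_code | translate_code/comments_hash.py | _find_hash_outside_strings
-- ===== SOURCE A (Python) =====
-- def _find_hash_outside_strings(line: str) -> int | None:
--     """Index of first `#` that starts a comment (not inside single/double-quoted strings)."""
--     i = 0
--     n = len(line)
--     in_dquote = False
--     in_squote = False
--     escape = False
--     while i < n:
--         ch = line[i]
--         if escape:
--             escape = False
--             i += 1
--             continue
--         if in_dquote:
--             if ch == "\\":
--                 escape = True
--             elif ch == '"':
--                 in_dquote = False
--             i += 1
--             continue
--         if in_squote:
--             if ch == "\\":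
--                 escape = True
--             elif ch == "'":
--                 in_squote = False
--             i += 1
--             continue
--         if ch == '"':
--             in_dquote = True
--             i += 1
--             continue
--         if ch == "'":
--             in_squote = True
--             i += 1
--             continue
--         if ch == "#":
--             return i
--         i += 1
--     return None
-- ===== SOURCE B (Python) =====
-- import re
--
-- # One precompiled token pattern: a double-quoted string, a single-quoted string,
-- # or a bare '#'.  (?s) lets '\\.' escape any character including a newline; the
-- # optional closing quote makes an unterminated string swallow the rest of the line.
-- _TOKEN = re.compile(r'(?s)"(?:\\.|[^"\\])*"?'
--                     r"|'(?:\\.|[^'\\])*'?"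
--                     r"|#")
--
--
-- def _find_hash_outside_strings(line: str) -> int | None:
--     """Index of first `#` that starts a comment (not inside single/double-quoted strings)."""
--     for m in _TOKEN.finditer(line):
--         if m.group() == "#":
--             return m.start()
--     return None
-- ===== Notes on version B (the rewrite author's own statement) =====
-- stated objective: faster
-- what changed: Replaces the hand-rolled three-flag state machine by a declarative precompiled regex (double-quoted string | single-quoted string | bare hash, with escapes handled inside quote groups and an optional closing quote so unterminated strings swallow the rest of the line) iterated with finditer, returning the start of the first bare hash token; the scan runs in the C regex engine instead of a Python bytecode loop.
import Mathlib
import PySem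

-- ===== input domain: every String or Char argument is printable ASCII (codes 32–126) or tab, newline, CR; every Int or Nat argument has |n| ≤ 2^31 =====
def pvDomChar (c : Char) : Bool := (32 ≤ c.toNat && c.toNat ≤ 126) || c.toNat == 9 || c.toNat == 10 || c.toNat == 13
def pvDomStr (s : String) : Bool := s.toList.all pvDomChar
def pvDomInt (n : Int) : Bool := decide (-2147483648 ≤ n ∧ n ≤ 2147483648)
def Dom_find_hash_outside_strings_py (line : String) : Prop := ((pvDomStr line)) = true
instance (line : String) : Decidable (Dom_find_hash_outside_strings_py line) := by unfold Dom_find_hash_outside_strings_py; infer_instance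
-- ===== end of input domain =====

-- B replaces the three-flag state machine by a declarative regex token scan (string | string | '#') via finditer: more idiomatic, same O(n) cost.

-- ===== PORT A =====
def BSLASH : Char := '\\'
def QUOTE : Char := '\''
-- literal port of A's while loop: state (remaining chars, index i, in_dquote, in_squote, escape)
def pvGoA : List Char → Int → Bool → Bool → Bool → Option Int
  | [], _, _, _, _ => none
  | ch :: rest, i, dq, sq, esc =>
    if esc then pvGoA rest (i + 1) dq sq false
    else if dq then
      if ch = BSLASH then pvGoA rest (i + 1) dq sq true
      else if ch = '"' then pvGoA rest (i + 1) false sq false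
      else pvGoA rest (i + 1) dq sq false
    else if sq then
      if ch = BSLASH then pvGoA rest (i + 1) dq sq true
      else if ch = QUOTE then pvGoA rest (i + 1) dq false false
      else pvGoA rest (i + 1) dq sq false
    else if ch = '"' then pvGoA rest (i + 1) true sq false
    else if ch = QUOTE then pvGoA rest (i + 1) dq true false
    else if ch = '#' then some i
    else pvGoA rest (i + 1) dq sq false

def find_hash_outside_strings_py (line : String) : Option Int :=
  pvGoA line.toList 0 false false false

-- ===== PORT B =====
-- Hand port of B's regex (PySem has no regex): the quoted-string alternative
-- q(?:\\.|[^q\\])*q?  matched at an opening quote.  pvStrTail consumes its body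
-- after the opening quote: '\\.' eats two characters ('.' with (?s) matches any
-- character, but needs one — a lone trailing backslash ends the match before it),
-- '[^q\\]' eats one, and the optional closing quote ends the token.  The
-- alternation is deterministic (no backtracking: the body's branches and the
-- closing quote are mutually exclusive), so this is exact for the pattern.
-- Returns (remaining characters, index just past the token).
def pvStrTail : List Char → Int → Char → List Char × Int
  | [], j, _ => ([], j)
  | c :: rest, j, q =>
    if c = BSLASH then
      match rest with
      | [] => ([c], j)                 -- '\\.' needs a following char; match ends before the backslash
      | _ :: rest' => pvStrTail rest' (j + 2) q
    else if c = q then (rest, j + 1)   -- optional closing quote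
    else pvStrTail rest (j + 1) q      -- [^q\\]

theorem pvStrTail_len_fuel : ∀ (n : Nat) (l : List Char), l.length ≤ n → ∀ (j : Int) (q : Char), (pvStrTail l j q).1.length ≤ l.length := by
  intro n
  induction n with
  | zero =>
    intro l hl j q
    match l with
    | [] => simp [pvStrTail]
    | c :: rest => simp at hl
  | succ n ih =>
    intro l hl j q
    match l with
    | [] => simp [pvStrTail]
    | c :: rest =>
      by_cases hc : c = BSLASH
      · match rest with
        | [] => simp [pvStrTail, hc]
        | d :: rest' =>
          simp only [pvStrTail, hc, if_true]
          have := ih rest' (by simp at hl ⊢; omega) (j + 2) q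
          simp at this ⊢
          omega
      · by_cases hq : c = q
        · subst hq
          rw [pvStrTail.eq_def]
          simp [hc]
        · rw [pvStrTail.eq_def]
          simp only [hc, hq, if_false]
          have := ih rest (by simp at hl ⊢; omega) (j + 1) q
          simp at this ⊢
          omega

theorem pvStrTail_len (l : List Char) (j : Int) (q : Char) : (pvStrTail l j q).1.length ≤ l.length :=
  pvStrTail_len_fuel l.length l (Nat.le_refl _) j q

-- finditer over the alternation: a match can only start at '"', '\'' (first two
-- alternatives) or '#' (third); on the first bare-'#' token return m.start(),
-- any other position advances by one (no alternative matches there).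
def pvFindIter : List Char → Int → Option Int
  | [], _ => none
  | c :: rest, i =>
    if c = '"' ∨ c = QUOTE then
      pvFindIter (pvStrTail rest (i + 1) c).1 (pvStrTail rest (i + 1) c).2
    else if c = '#' then some i
    else pvFindIter rest (i + 1)
termination_by l _ => l.length
decreasing_by
  · exact Nat.lt_succ_of_le (pvStrTail_len _ _ _)
  · simp

def find_hash_outside_strings_py_alt (line : String) : Option Int :=
  pvFindIter line.toList 0

-- ===== PRECONDITION & SPEC =====
def Spec_find_hash_outside_strings_py (line : String) (out : Option Int) : Prop := out = find_hash_outside_strings_py_alt line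
instance (line : String) (out : Option Int) : Decidable (Spec_find_hash_outside_strings_py line out) := by unfold Spec_find_hash_outside_strings_py; infer_instance

-- ===== CLAIM (what is proved, stated in full; the proofs are below) =====
def Claim_equal_find_hash_outside_strings_py : Prop := ∀ (line : String), Dom_find_hash_outside_strings_py line → Spec_find_hash_outside_strings_py line (find_hash_outside_strings_py line)

-- ===== LEMMAS AND PROOFS =====

-- inside a double-quoted string, A's state machine agrees with B's string token
theorem pvAuxD : ∀ (n : Nat) (l : List Char), l.length ≤ n → ∀ (j : Int),
    pvGoA l j true false false
      = pvGoA (pvStrTail l j '"').1 (pvStrTail l j '"').2 false false false := by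
  intro n
  induction n with
  | zero =>
    intro l hl j
    match l with
    | [] => simp [pvGoA, pvStrTail]
    | c :: rest => simp at hl
  | succ n ih =>
    intro l hl j
    match l with
    | [] => simp [pvGoA, pvStrTail]
    | c :: rest =>
      by_cases hc : c = BSLASH
      · match rest with
        | [] => simp [pvGoA, pvStrTail, hc, BSLASH, QUOTE]
        | d :: rest' =>
          rw [pvStrTail.eq_def]
          simp only [pvGoA, hc, BSLASH, if_true, if_false, Bool.false_eq_true,
            reduceCtorEq, reduceIte]
          rw [show j + 1 + 1 = j + 2 from by ring]
          exact ih rest' (by simp at hl ⊢; omega) (j + 2)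
      · by_cases hq : c = '"'
        · subst hq
          rw [pvStrTail.eq_def]
          simp [pvGoA, BSLASH]
        · rw [pvStrTail.eq_def]
          simp only [pvGoA, hc, hq, BSLASH, if_false, Bool.false_eq_true,
            reduceCtorEq, reduceIte] at hc ⊢
          simp only [hc, hq, if_false, reduceIte]
          exact ih rest (by simp at hl ⊢; omega) (j + 1)

-- inside a single-quoted string, A's state machine agrees with B's string token
theorem pvAuxS : ∀ (n : Nat) (l : List Char), l.length ≤ n → ∀ (j : Int),
    pvGoA l j false true false
      = pvGoA (pvStrTail l j QUOTE).1 (pvStrTail l j QUOTE).2 false false false := by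
  intro n
  induction n with
  | zero =>
    intro l hl j
    match l with
    | [] => simp [pvGoA, pvStrTail]
    | c :: rest => simp at hl
  | succ n ih =>
    intro l hl j
    match l with
    | [] => simp [pvGoA, pvStrTail]
    | c :: rest =>
      by_cases hc : c = BSLASH
      · match rest with
        | [] => simp [pvGoA, pvStrTail, hc, BSLASH, QUOTE]
        | d :: rest' =>
          rw [pvStrTail.eq_def]
          simp only [pvGoA, hc, BSLASH, QUOTE, if_true, if_false, Bool.false_eq_true,
            reduceCtorEq, reduceIte]
          rw [show j + 1 + 1 = j + 2 from by ring]
          exact ih rest' (by simp at hl ⊢; omega) (j + 2)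
      · by_cases hq : c = QUOTE
        · subst hq
          rw [pvStrTail.eq_def]
          simp [pvGoA, BSLASH, QUOTE]
        · rw [pvStrTail.eq_def]
          simp only [pvGoA, hc, hq, BSLASH, QUOTE, if_false, Bool.false_eq_true,
            reduceCtorEq, reduceIte] at hc hq ⊢
          simp only [hc, hq, if_false, reduceIte]
          exact ih rest (by simp at hl ⊢; omega) (j + 1)

-- outside strings, A's state machine agrees with B's finditer scan
theorem pvMain : ∀ (n : Nat) (l : List Char), l.length ≤ n → ∀ (j : Int),
    pvGoA l j false false false = pvFindIter l j := by
  intro n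
  induction n with
  | zero =>
    intro l hl j
    match l with
    | [] => simp [pvGoA, pvFindIter]
    | c :: rest => simp at hl
  | succ n ih =>
    intro l hl j
    match l with
    | [] => simp [pvGoA, pvFindIter]
    | c :: rest =>
      have hlen : rest.length ≤ n := by simp at hl; omega
      by_cases hd : c = '"'
      · subst hd
        rw [pvFindIter.eq_def]
        simp only [pvGoA, if_true, if_false, Bool.false_eq_true, reduceCtorEq,
          reduceIte, true_or]
        rw [pvAuxD rest.length rest (Nat.le_refl _) (j + 1)]
        exact ih _ (Nat.le_trans (pvStrTail_len rest (j + 1) '"') hlen) _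
      · by_cases hs : c = QUOTE
        · subst hs
          rw [pvFindIter.eq_def]
          simp only [pvGoA, QUOTE, if_true, if_false, Bool.false_eq_true, reduceCtorEq,
            reduceIte, or_true] at hd ⊢
          simp only [hd, if_false, reduceIte]
          rw [pvAuxS rest.length rest (Nat.le_refl _) (j + 1)]
          exact ih _ (Nat.le_trans (pvStrTail_len rest (j + 1) QUOTE) hlen) _
        · by_cases hh : c = '#'
          · subst hh
            rw [pvFindIter.eq_def]
            simp only [QUOTE] at hs
            simp [pvGoA, hd, hs, QUOTE]
          · rw [pvFindIter.eq_def]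
            simp only [pvGoA, QUOTE, Bool.false_eq_true, reduceCtorEq, reduceIte] at hd hs hh ⊢
            simp only [hd, hs, hh, if_false, reduceIte, or_self, or_false, false_or]
            exact ih rest hlen (j + 1)

-- ===== VERDICT (by name: the statement is the Claim_ definition above) =====
theorem find_hash_outside_strings_py_spec : Claim_equal_find_hash_outside_strings_py := by
  intro line _
  unfold Spec_find_hash_outside_strings_py find_hash_outside_strings_py find_hash_outside_strings_py_alt
  exact pvMain line.toList.length line.toList (Nat.le_refl _) 0
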